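-- pv_equiv track=rewrite | github.com/aspadm/EIrepack | Formats/binary_readers.py | half_to_float
-- ===== SOURCE A (Python) =====
-- def half_to_float(h):
--     s = int((h >> 15) & 0x00000001)    # sign
--     e = int((h >> 10) & 0x0000001f)    # exponent
--     f = int(h & 0x000003ff)            # fraction
--
--     if e == 0:
--        if f == 0:
--           return int(s << 31)
--        else:
--           while not (f & 0x00000400):
--              f <<= 1
--              e -= 1
--           e += 1
--           f &= ~0x00000400
--     elif e == 31:
--        if f == 0:
--           return int((s << 31) | 0x7f800000)
--        else:
--           return int((s << 31) | 0x7f800000 | (f << 13))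
--
--     e = e + (127 -15)
--     f = f << 13
--
--     return int((s << 31) | (e << 23) | f)
-- ===== SOURCE B (Python) =====
-- def half_to_float(h):
--     s = (h >> 15) & 1
--     e = (h >> 10) & 0x1F
--     f = h & 0x3FF
--
--     if e == 31:  # inf / nan
--         inf = (s << 31) | 0x7F800000
--         return inf if f == 0 else inf | (f << 13)
--
--     if e == 0:
--         if f == 0:  # signed zero
--             return s << 31
--         # subnormal: normalize by a single shift computed from the bit length
--         L = f.bit_length()
--         f = (f << (11 - L)) & 0x3FF
--         e = L - 10
--
--     return (s << 31) | ((e + 112) << 23) | (f << 13)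
-- ===== Notes on version B (the rewrite author's own statement) =====
-- stated objective: simpler
-- what changed: The subnormal normalization while-loop is replaced by a closed form: one shift computed from f.bit_length() and a mask, with the exponent set directly to bit_length-10; branches are reordered (inf/nan first) and the special-exponent result is shared.
import Mathlib
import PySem

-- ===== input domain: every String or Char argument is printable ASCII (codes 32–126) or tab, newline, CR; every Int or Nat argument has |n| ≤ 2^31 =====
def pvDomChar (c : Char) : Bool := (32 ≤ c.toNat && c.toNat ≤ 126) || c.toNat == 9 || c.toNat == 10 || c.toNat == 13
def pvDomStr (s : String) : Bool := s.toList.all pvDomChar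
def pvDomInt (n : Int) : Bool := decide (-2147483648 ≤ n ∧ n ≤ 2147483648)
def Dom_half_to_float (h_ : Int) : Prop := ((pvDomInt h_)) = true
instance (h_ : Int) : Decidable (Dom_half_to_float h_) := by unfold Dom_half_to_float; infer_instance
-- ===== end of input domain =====

-- B replaces A's subnormal-normalization while-loop by a closed form from bit_length (return value only; simpler, not measured faster).

-- ===== PORT A =====
-- the 'while not (f & 0x400): f <<= 1; e -= 1' loop; fuel only makes it total
-- (the loop runs at most 10 times since 1 ≤ f < 1024 at entry)
def halfLoopA : Nat → Int → Int → Int × Int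
  | 0, f, e => (f, e)
  | fuel + 1, f, e =>
    if PySem.Int.band f 1024 = 0 then halfLoopA fuel (f <<< (1:Nat)) (e - 1) else (f, e)

def half_to_float (h_ : Int) : Int :=
  let s := PySem.Int.band (h_ >>> (15:Nat)) 1
  let e := PySem.Int.band (h_ >>> (10:Nat)) 31
  let f := PySem.Int.band h_ 1023
  if e = 0 then
    if f = 0 then s <<< (31:Nat)
    else
      let p := halfLoopA 11 f e
      let e1 := p.2 + 1
      let f1 := PySem.Int.band p.1 (Int.not 1024)
      let e2 := e1 + (127 - 15)
      let f2 := f1 <<< (13:Nat)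
      PySem.Int.bor (PySem.Int.bor (s <<< (31:Nat)) (e2 <<< (23:Nat))) f2
  else if e = 31 then
    if f = 0 then PySem.Int.bor (s <<< (31:Nat)) 0x7f800000
    else PySem.Int.bor (PySem.Int.bor (s <<< (31:Nat)) 0x7f800000) (f <<< (13:Nat))
  else
    let e2 := e + (127 - 15)
    let f2 := f <<< (13:Nat)
    PySem.Int.bor (PySem.Int.bor (s <<< (31:Nat)) (e2 <<< (23:Nat))) f2

-- ===== PORT B =====
def half_to_float_alt (h_ : Int) : Int :=
  let s := PySem.Int.band (h_ >>> (15:Nat)) 1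
  let e := PySem.Int.band (h_ >>> (10:Nat)) 31
  let f := PySem.Int.band h_ 1023
  if e = 31 then
    let inf := PySem.Int.bor (s <<< (31:Nat)) 0x7f800000
    if f = 0 then inf else PySem.Int.bor inf (f <<< (13:Nat))
  else if e = 0 then
    if f = 0 then s <<< (31:Nat)
    else
      let L := PySem.Int.bitLength f
      let f1 := PySem.Int.band (f <<< (11 - L)) 1023
      let e1 := (L : Int) - 10
      PySem.Int.bor (PySem.Int.bor (s <<< (31:Nat)) ((e1 + 112) <<< (23:Nat))) (f1 <<< (13:Nat))
  else
    PySem.Int.bor (PySem.Int.bor (s <<< (31:Nat)) ((e + 112) <<< (23:Nat))) (f <<< (13:Nat))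

-- ===== PRECONDITION & SPEC =====
def Spec_half_to_float (h_ : Int) (out : Int) : Prop := out = half_to_float_alt h_
instance (h_ : Int) (out : Int) : Decidable (Spec_half_to_float h_ out) := by unfold Spec_half_to_float; infer_instance

-- ===== CLAIM (what is proved, stated in full; the proofs are below) =====
def Claim_equal_half_to_float : Prop := ∀ (h_ : Int), Dom_half_to_float h_ → Spec_half_to_float h_ (half_to_float h_)

-- ===== LEMMAS AND PROOFS =====

lemma nat_and1024_lo (n : Nat) (h : n < 1024) : n &&& 1024 = 0 := by
  have hb : n.testBit 10 = false := Nat.testBit_lt_two_pow (by omega)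
  have := Nat.and_two_pow n 10
  rw [hb] at this; simpa using this

lemma nat_and1024_hi (n : Nat) (h0 : 1024 ≤ n) (h1 : n < 2048) : n &&& 1024 = 1024 := by
  have hb : n.testBit 10 = true := by
    have hd : n / 2 ^ 10 = 1 := by omega
    simp only [Nat.testBit, Nat.shiftRight_eq_div_pow, hd]
    decide
  have := Nat.and_two_pow n 10
  rw [hb] at this; simpa using this

lemma nat_and1023 (n : Nat) : n &&& 1023 = n % 1024 := by
  have := Nat.and_two_pow_sub_one_eq_mod n 10
  norm_num at this; exact this

lemma band_mask1023_bounds (a : Int) : 0 ≤ PySem.Int.band a 1023 ∧ PySem.Int.band a 1023 < 1024 := by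
  unfold PySem.Int.band
  have ht : (1023:Int).toNat = 1023 := rfl
  split_ifs with h1 h2 h2
  · rw [ht]; have := nat_and1023 a.toNat; omega
  · omega
  · rw [ht]; omega
  · omega

lemma band1024_lo (f : Int) (h0 : 0 ≤ f) (h1 : f < 1024) : PySem.Int.band f 1024 = 0 := by
  unfold PySem.Int.band
  rw [if_pos h0, if_pos (by norm_num)]
  have ht : (1024:Int).toNat = 1024 := rfl
  rw [ht, nat_and1024_lo f.toNat (by omega)]
  rfl

lemma band1024_hi (f : Int) (h0 : 1024 ≤ f) (h1 : f < 2048) : PySem.Int.band f 1024 = 1024 := by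
  unfold PySem.Int.band
  rw [if_pos (by omega), if_pos (by norm_num)]
  have ht : (1024:Int).toNat = 1024 := rfl
  rw [ht, nat_and1024_hi f.toNat (by omega) (by omega)]
  rfl

lemma band_not1024 (x : Int) (h0 : 1024 ≤ x) (h1 : x < 2048) :
    PySem.Int.band x (Int.not 1024) = x - 1024 := by
  have hn : (Int.not 1024 : Int) = -1025 := by decide
  rw [hn]
  unfold PySem.Int.band
  rw [if_pos (by omega), if_neg (by norm_num)]
  have ht : (-(-1025:Int) - 1).toNat = 1024 := rfl
  rw [ht, nat_and1024_hi x.toNat (by omega) (by omega)]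
  omega

lemma band1023_mid (x : Int) (h0 : 1024 ≤ x) (h1 : x < 2048) :
    PySem.Int.band x 1023 = x - 1024 := by
  unfold PySem.Int.band
  rw [if_pos (by omega), if_pos (by norm_num)]
  have ht : (1023:Int).toNat = 1023 := rfl
  rw [ht, nat_and1023 x.toNat]
  omega

lemma loopA_spec : ∀ (d fuel : Nat) (f e : Int), d < fuel → 0 ≤ f →
    1024 ≤ f * 2 ^ d → f * 2 ^ d < 2048 →
    halfLoopA fuel f e = (f * 2 ^ d, e - d) := by
  intro d
  induction d with
  | zero =>
    intro fuel f e hfu h0 hlo hhi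
    obtain ⟨k, rfl⟩ : ∃ k, fuel = k + 1 := ⟨fuel - 1, by omega⟩
    simp only [pow_zero, mul_one] at hlo hhi
    simp [halfLoopA, band1024_hi f hlo hhi]
  | succ d ih =>
    intro fuel f e hfu h0 hlo hhi
    obtain ⟨k, rfl⟩ : ∃ k, fuel = k + 1 := ⟨fuel - 1, by omega⟩
    have hmul : f * 2 ^ (d + 1) = (f * 2) * 2 ^ d := by ring
    have hsmall : f < 1024 := by
      nlinarith [pow_pos (show (0:Int) < 2 by norm_num) d]
    simp only [halfLoopA, band1024_lo f h0 hsmall]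
    have := ih k (f <<< (1:Nat)) (e - 1) (by omega)
      (by rw [Int.shiftLeft_eq]; positivity)
      (by rw [Int.shiftLeft_eq]; norm_num; omega)
      (by rw [Int.shiftLeft_eq]; norm_num; omega)
    rw [this, Int.shiftLeft_eq]
    norm_num
    constructor
    · omega
    · ring

lemma half_eq (h_ : Int) : half_to_float h_ = half_to_float_alt h_ := by
  unfold half_to_float half_to_float_alt
  simp only []
  set s := PySem.Int.band (h_ >>> (15:Nat)) 1 with hs
  set e := PySem.Int.band (h_ >>> (10:Nat)) 31 with he
  set f := PySem.Int.band h_ 1023 with hf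
  have hfb := band_mask1023_bounds h_
  rw [← hf] at hfb
  by_cases he0 : e = 0
  · rw [he0]
    norm_num
    by_cases hf0 : f = 0
    · simp [hf0]
    · rw [if_neg hf0, if_neg hf0]
      -- subnormal case
      set L := PySem.Int.bitLength f with hLdef
      have hfa : f.natAbs = f.toNat := by omega
      have hub : f.natAbs < 2 ^ L := PySem.Int.lt_two_pow_bitLength f
      have hlb : 2 ^ (L - 1) ≤ f.natAbs := PySem.Int.two_pow_bitLength_le f hf0
      have hL1 : 1 ≤ L := by
        by_contra hc
        have : L = 0 := by omega
        rw [this] at hub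
        simp at hub
        omega
      have hL10 : L ≤ 10 := by
        by_contra hc
        have : (2:Nat) ^ 10 ≤ 2 ^ (L - 1) := Nat.pow_le_pow_right (by norm_num) (by omega)
        omega
      have hpow : (2:Int) ^ (L - 1) * 2 ^ (11 - L) = 1024 := by
        rw [← pow_add]
        have : L - 1 + (11 - L) = 10 := by omega
        rw [this]; norm_num
      have hlpow : (2:Int) ^ (L - 1) ≤ f := by
        have := hlb
        rw [hfa] at this
        have h2 : ((2:Nat) ^ (L - 1) : Int) ≤ (f.toNat : Int) := by exact_mod_cast this
        push_cast at h2
        omega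
      have hupow : f < (2:Int) ^ L := by
        have := hub
        rw [hfa] at this
        have h2 : ((f.toNat : Int)) < ((2:Nat) ^ L : Int) := by exact_mod_cast this
        push_cast at h2
        omega
      have hposd : (0:Int) < 2 ^ (11 - L) := by positivity
      have hlo : 1024 ≤ f * 2 ^ (11 - L) := by
        calc (1024:Int) = 2 ^ (L - 1) * 2 ^ (11 - L) := hpow.symm
        _ ≤ f * 2 ^ (11 - L) := by
              apply mul_le_mul_of_nonneg_right hlpow (le_of_lt hposd)
      have hhi : f * 2 ^ (11 - L) < 2048 := by
        have hstep : (2:Int) ^ L * 2 ^ (11 - L) = 2048 := by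
          rw [← pow_add]
          have : L + (11 - L) = 11 := by omega
          rw [this]; norm_num
        calc f * 2 ^ (11 - L) < 2 ^ L * 2 ^ (11 - L) := by
              apply mul_lt_mul_of_pos_right hupow hposd
        _ = 2048 := hstep
      rw [loopA_spec (11 - L) 11 f 0 (by omega) (by omega) hlo hhi]
      simp only []
      rw [show f <<< (11 - L) = f * 2 ^ (11 - L) from Int.shiftLeft_eq f _]
      rw [band_not1024 _ hlo hhi, band1023_mid _ hlo hhi]
      have harg : (0 - ((11 - L : Nat) : Int) + 1 + 112) = ((L : Int) - 10 + 112) := by omega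
      rw [harg]
  · rw [if_neg he0]
    by_cases he31 : e = 31
    · rw [if_pos he31, if_pos he31]
    · rw [if_neg he31, if_neg he31, if_neg he0]
      norm_num

-- ===== VERDICT (by name: the statement is the Claim_ definition above) =====
theorem half_to_float_spec : Claim_equal_half_to_float := by
  intro h_ _
  unfold Spec_half_to_float
  exact half_eq h_
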